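-- pv_equiv track=rewrite | github.com/thom-heinrich/twinr | scripts/git_guard_tool/scanner.py | _iter_token_like_fragments
-- ===== SOURCE A (Python) =====
-- def _iter_token_like_fragments(text: str) -> tuple[str, ...]:
--     fragments: list[str] = []
--     current: list[str] = []
--     for character in text:
--         if character.isalnum() or character in {"-", "_"}:
--             current.append(character)
--             continue
--         if current:
--             fragments.append("".join(current))
--             current.clear()
--     if current:
--         fragments.append("".join(current))
--     return tuple(fragments)
-- ===== SOURCE B (Python) =====
-- def _iter_token_like_fragments(text: str) -> tuple[str, ...]:
--     # Two staged passes: normalize every non-token character to a space,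
--     # then let str.split() extract the maximal token runs.  Correct because
--     # token characters (alnum, '-', '_') are never whitespace.
--     normalized = "".join(c if c.isalnum() or c in {"-", "_"} else " " for c in text)
--     return tuple(normalized.split())
-- ===== Notes on version B (the rewrite author's own statement) =====
-- stated objective: idiomatic
-- what changed: Replaces the single-pass buffer-accumulator loop with two staged passes: first map every non-token character to a space, then use str.split() to extract the maximal token runs.
import Mathlib
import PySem

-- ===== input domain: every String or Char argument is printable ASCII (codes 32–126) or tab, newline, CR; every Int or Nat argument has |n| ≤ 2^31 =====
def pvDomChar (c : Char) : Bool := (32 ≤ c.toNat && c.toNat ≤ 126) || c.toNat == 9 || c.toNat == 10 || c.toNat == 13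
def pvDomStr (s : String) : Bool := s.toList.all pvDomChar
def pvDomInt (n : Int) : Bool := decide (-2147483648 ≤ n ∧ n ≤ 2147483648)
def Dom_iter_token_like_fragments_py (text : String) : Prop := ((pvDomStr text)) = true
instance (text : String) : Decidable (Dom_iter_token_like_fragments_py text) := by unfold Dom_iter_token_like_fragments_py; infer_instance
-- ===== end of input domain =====

-- B replaces A's single-pass buffer-accumulator loop with two staged passes:
-- normalize each non-token character to a space, then split() on whitespace; objective: idiomatic.

-- character.isalnum() or character in {"-", "_"}   (the token-character predicate)
def pvTokChar (c : Char) : Bool := PySem.Chars.isalnum c || c == '-' || c == '_'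

-- ===== PORT A =====
-- the loop of A as structural recursion over the same state (fragments, current)
def pvAGo (chars : List Char) (fragments : List String) (current : List Char) : List String :=
  match chars with
  | [] => if current.isEmpty then fragments else fragments ++ [String.ofList current]
  | c :: rest =>
    if pvTokChar c then pvAGo rest fragments (current ++ [c])
    else if current.isEmpty then pvAGo rest fragments current
    else pvAGo rest (fragments ++ [String.ofList current]) []

def iter_token_like_fragments_py (text : String) : List String :=
  pvAGo text.toList [] []

-- ===== PORT B =====
-- normalized = "".join(c if c.isalnum() or c in {"-","_"} else " " for c in text); normalized.split()
def iter_token_like_fragments_py_alt (text : String) : List String :=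
  PySem.Str.split₀ (String.ofList (text.toList.map (fun c => if pvTokChar c then c else ' ')))

-- ===== PRECONDITION & SPEC =====
def Spec_iter_token_like_fragments_py (text : String) (out : List String) : Prop := out = iter_token_like_fragments_py_alt text
instance (text : String) (out : List String) : Decidable (Spec_iter_token_like_fragments_py text out) := by unfold Spec_iter_token_like_fragments_py; infer_instance

-- ===== CLAIM (what is proved, stated in full; the proofs are below) =====
def Claim_equal_iter_token_like_fragments_py : Prop := ∀ (text : String), Dom_iter_token_like_fragments_py text → Spec_iter_token_like_fragments_py text (iter_token_like_fragments_py text)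

-- ===== LEMMAS AND PROOFS =====

-- no token character is whitespace (so normalizing separators to ' ' loses nothing)
theorem pv_tok_not_space (c : Char) (h : pvTokChar c = true) : PySem.Chars.isspace c = false := by
  have hn : (65 ≤ c.toNat ∧ c.toNat ≤ 90) ∨ (97 ≤ c.toNat ∧ c.toNat ≤ 122) ∨
      (48 ≤ c.toNat ∧ c.toNat ≤ 57) ∨ c.toNat = 45 ∨ c.toNat = 95 := by
    simp only [pvTokChar, PySem.Chars.isalnum, PySem.Chars.isalpha, PySem.Chars.isdigit,
      PySem.Chars.isupper, PySem.Chars.islower, Bool.or_eq_true, Bool.and_eq_true,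
      decide_eq_true_eq, beq_iff_eq, Char.le_def, UInt32.le_iff_toNat_le] at h
    rcases h with (((⟨h1,h2⟩|⟨h1,h2⟩)|⟨h1,h2⟩)|h)|h
    · exact Or.inl ⟨h1, h2⟩
    · exact Or.inr (Or.inl ⟨h1, h2⟩)
    · exact Or.inr (Or.inr (Or.inl ⟨h1, h2⟩))
    · subst h; exact Or.inr (Or.inr (Or.inr (Or.inl rfl)))
    · subst h; exact Or.inr (Or.inr (Or.inr (Or.inr rfl)))
  simp only [PySem.Chars.isspace]
  simp only [Bool.or_eq_false_iff, Bool.and_eq_false_iff, decide_eq_false_iff_not]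
  omega

-- already-collected fragments are a passive prefix of A's loop state
theorem pvAGo_frags (chars : List Char) (fragments : List String) (current : List Char) :
    pvAGo chars fragments current = fragments ++ pvAGo chars [] current := by
  induction chars generalizing fragments current with
  | nil => simp only [pvAGo]; split <;> simp
  | cons c rest ih =>
    simp only [pvAGo, List.nil_append]
    split_ifs with h1 h2
    · exact ih fragments (current ++ [c])
    · exact ih fragments current
    · rw [ih (fragments ++ [String.ofList current]) [], ih [String.ofList current] []]
      simp

-- the words already closed off by split₀.go are a passive prefix of its state
theorem pv_split_go_acc (s : List Char) (cur : List Char) (acc : List (List Char)) :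
    PySem.Chars.split₀.go s cur acc = acc.reverse ++ PySem.Chars.split₀.go s cur [] := by
  induction s generalizing cur acc with
  | nil => simp only [PySem.Chars.split₀.go]; split <;> simp
  | cons c rest ih =>
    simp only [PySem.Chars.split₀.go]
    split_ifs with h1 h2
    · rw [ih [] acc]
    · rw [ih [] (cur.reverse :: acc), ih [] [cur.reverse]]
      simp
    · exact ih (c :: cur) acc

-- A's loop with pending buffer `current` equals split₀ of the normalized tail,
-- with the buffer carried as split₀.go's reversed current word
theorem pvAGo_eq_go (l : List Char) (current : List Char) :
    pvAGo l [] current =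
      (PySem.Chars.split₀.go (l.map (fun c => if pvTokChar c then c else ' '))
        current.reverse []).map String.ofList := by
  induction l generalizing current with
  | nil =>
    simp only [pvAGo, List.map_nil, PySem.Chars.split₀.go]
    split_ifs with h1 h2 h2 <;> simp_all
  | cons c rest ih =>
    simp only [pvAGo, List.map_cons]
    by_cases htok : pvTokChar c = true
    · simp only [htok, if_true, PySem.Chars.split₀.go, pv_tok_not_space c htok,
        Bool.false_eq_true, if_false]
      rw [ih (current ++ [c])]
      simp
    · have hsp : PySem.Chars.isspace ' ' = true := rfl
      simp only [htok, Bool.false_eq_true, if_false, PySem.Chars.split₀.go, hsp, if_true]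
      by_cases hcur : current = []
      · subst hcur
        simpa using ih []
      · have hne : current.isEmpty = false := by simpa using hcur
        have hne' : current.reverse.isEmpty = false := by simpa using hcur
        simp only [hne, hne', Bool.false_eq_true, if_false, List.nil_append]
        rw [pvAGo_frags, pv_split_go_acc, ih []]
        simp

-- ===== VERDICT (by name: the statement is the Claim_ definition above) =====
theorem iter_token_like_fragments_py_spec : Claim_equal_iter_token_like_fragments_py := by
  intro text _
  unfold Spec_iter_token_like_fragments_py iter_token_like_fragments_py iter_token_like_fragments_py_alt
  simp only [PySem.Str.split₀, PySem.Chars.split₀, String.toList_ofList]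
  exact pvAGo_eq_go text.toList []
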